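-- pv_equiv track=rewrite | github.com/JohnnySunUmich/SQL_Testing | src/random_dep/util.py | readable_db
-- ===== SOURCE A (Python) =====
-- def readable_db(database: list):
--     output = ""
--     for table in database:
--         keys = []
--         for key in table.keys():
--             keys.append(key)
--         output += ",".join(keys) + "\n"
--         values = []
--         for key in keys:
--             values.append(table[key])
--         values = list(map(list, zip(*values)))
--         for row in values:
--             row_str = []
--             for entry in row:
--                 row_str.append(str(entry))
--             output += ",".join(row_str) + '\n'
--         output += "-"*50 + "\n"
--     return output
-- ===== SOURCE B (Python) =====
-- def readable_db(database: list):
--     chunks = []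
--     for table in database:
--         rows = None
--         for key in table:
--             strs = [str(v) for v in table[key]]
--             rows = strs if rows is None else [r + "," + s for r, s in zip(rows, strs)]
--         chunks.append("\n".join([",".join(table), *(rows or []), "-" * 50]) + "\n")
--     return "".join(chunks)
-- ===== Notes on version B (the rewrite author's own statement) =====
-- stated objective: alternative
-- what changed: B never materializes columns or a transposed matrix and has no row-index loop: it folds over the columns themselves, maintaining a list of partial row strings that each column extends in place (pairwise zip truncating to the shorter side gives the shortest-column row count for free), then joins each table's lines once.
import Mathlib
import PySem

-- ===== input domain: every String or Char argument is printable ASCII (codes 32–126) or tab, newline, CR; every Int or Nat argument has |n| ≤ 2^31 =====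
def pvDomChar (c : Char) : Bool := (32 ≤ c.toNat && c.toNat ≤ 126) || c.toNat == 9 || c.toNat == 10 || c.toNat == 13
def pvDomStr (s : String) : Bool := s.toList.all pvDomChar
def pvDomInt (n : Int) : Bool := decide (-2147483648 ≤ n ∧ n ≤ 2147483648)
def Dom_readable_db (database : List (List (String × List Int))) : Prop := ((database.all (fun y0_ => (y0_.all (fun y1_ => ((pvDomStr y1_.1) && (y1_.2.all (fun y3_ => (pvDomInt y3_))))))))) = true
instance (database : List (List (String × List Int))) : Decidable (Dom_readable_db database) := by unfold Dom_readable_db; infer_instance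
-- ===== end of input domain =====

-- B folds over the columns themselves, extending a list of partial row strings per column
-- (pairwise zip truncation replaces A's zip(*…)-transpose and row loop); objective: alternative decomposition.

-- ===== PORT A =====
-- "-"*50 written out as a literal
def sep50 : String := "--------------------------------------------------"

-- hand port of Python's zip(*cols) (map(list, …)): take heads of all columns while all are nonempty
def zipStar (cols : List (List Int)) : List (List Int) :=
  if h : cols.all (fun c => !c.isEmpty) ∧ cols ≠ [] then
    (cols.map (fun c => c.headI)) :: zipStar (cols.map (fun c => c.tail))
  else []
termination_by (cols.headI).length
decreasing_by
  cases cols with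
  | nil => exact absurd rfl h.2
  | cons c rest =>
    simp only [List.headI]
    have hc : ¬ c.isEmpty := by
      have := h.1; simp [List.all_cons] at this; exact by simp [this.1]
    cases c with
    | nil => simp at hc
    | cons a t => simp

def readable_db (database : List (List (String × List Int))) : String :=
  database.foldl (fun output table =>
    let d := PySem.Dict.ofList table
    -- keys loop: append each key of the dict
    let keys := d.keys.foldl (fun ks k => ks ++ [k]) ([] : List String)
    let output := output ++ PySem.Str.join "," keys ++ "\n"
    -- values loop (table[key] always succeeds since key comes from keys; the getD default is never used)
    let values := keys.foldl (fun vs k => vs ++ [d.getD k []]) ([] : List (List Int))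
    let rows := zipStar values
    let output := rows.foldl (fun out row =>
      out ++ PySem.Str.join "," (row.foldl (fun rs e => rs ++ [PySem.Int.toStr e]) ([] : List String)) ++ "\n") output
    output ++ sep50 ++ "\n") ""

-- ===== PORT B =====
def readable_db_alt (database : List (List (String × List Int))) : String :=
  let chunks := database.foldl (fun chunks table =>
    let d := PySem.Dict.ofList table
    -- inner loop over keys: rows is None, then a list of partial row strings extended per column
    -- (zip(rows, strs) truncates to the shorter list = List.zipWith); lookup d.getD k [] always
    -- succeeds since k comes from the dict's keys, the default [] is never used
    let rows := d.keys.foldl (fun rows k =>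
      let strs := (d.getD k []).map PySem.Int.toStr
      match rows with
      | none => some strs
      | some rs => some (List.zipWith (fun r s => r ++ "," ++ s) rs strs)) (none : Option (List String))
    -- "\n".join([",".join(table), *(rows or []), "-"*50]) + "\n"  ('rows or []' = getD [])
    chunks ++ [PySem.Str.join "\n" (PySem.Str.join "," d.keys :: (rows.getD [] ++ [sep50])) ++ "\n"])
    ([] : List String)
  String.join chunks

-- ===== PRECONDITION & SPEC =====
def Spec_readable_db (database : List (List (String × List Int))) (out : String) : Prop := out = readable_db_alt database
instance (database : List (List (String × List Int))) (out : String) : Decidable (Spec_readable_db database out) := by unfold Spec_readable_db; infer_instance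

-- ===== CLAIM (what is proved, stated in full; the proofs are below) =====
def Claim_equal_readable_db : Prop := ∀ (database : List (List (String × List Int))), Dom_readable_db database → Spec_readable_db database (readable_db database)

-- ===== LEMMAS AND PROOFS =====

-- proof-side definitions and lemmas

def mlen (cols : List (List Int)) : Nat := ((cols.map List.length).min?).getD 0

theorem mlen_le (cols : List (List Int)) (c : List Int) (hc : c ∈ cols) : mlen cols ≤ c.length := by
  unfold mlen
  rcases h : (cols.map List.length).min? with _ | m
  · simp [List.min?_eq_none_iff] at h; simp [h] at hc
  · have := (List.min?_eq_some_iff.mp h).2 c.length (List.mem_map_of_mem hc)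
    simpa using this

theorem mlen_mem (cols : List (List Int)) (h : cols ≠ []) : ∃ c ∈ cols, c.length = mlen cols := by
  unfold mlen
  rcases hm : (cols.map List.length).min? with _ | m
  · simp [List.min?_eq_none_iff] at hm; exact absurd hm h
  · have := (List.min?_eq_some_iff.mp hm).1
    simp only [List.mem_map] at this
    obtain ⟨c, hc, hlen⟩ := this
    exact ⟨c, hc, by simp [hlen]⟩

theorem mlen_tail (cols : List (List Int)) (hne : cols ≠ []) :
    mlen (cols.map List.tail) = mlen cols - 1 := by
  rcases hm : (cols.map List.length).min? with _ | m
  · simp [List.min?_eq_none_iff] at hm; exact absurd hm hne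
  · have hmem := (List.min?_eq_some_iff.mp hm).1
    have hlb := (List.min?_eq_some_iff.mp hm).2
    have hm' : ((cols.map List.tail).map List.length).min? = some (m - 1) := by
      rw [List.min?_eq_some_iff]
      constructor
      · rw [List.map_map]
        simp only [List.mem_map] at hmem ⊢
        obtain ⟨c, hc, hlen⟩ := hmem
        exact ⟨c, hc, by simp [Function.comp, List.length_tail, hlen]⟩
      · intro b hb
        rw [List.map_map] at hb
        simp only [List.mem_map] at hb
        obtain ⟨c, hc, hlen⟩ := hb
        have := hlb c.length (List.mem_map_of_mem hc)
        simp only [Function.comp, List.length_tail] at hlen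
        omega
    unfold mlen
    rw [hm', hm]
    rfl

theorem zipStar_eq (n : Nat) : ∀ cols, mlen cols = n →
    zipStar cols = (List.range n).map (fun i => cols.map (fun c => c.getD i 0)) := by
  induction n with
  | zero =>
    intro cols h
    rw [zipStar]
    split_ifs with hC
    · exfalso
      obtain ⟨c, hc, hlen⟩ := mlen_mem cols hC.2
      rw [h] at hlen
      have := List.all_eq_true.mp hC.1 c hc
      simp [List.isEmpty_iff, List.length_eq_zero_iff] at this hlen
      exact this hlen
    · simp
  | succ k ih =>
    intro cols h
    rw [zipStar]
    split_ifs with hC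
    · have hne := hC.2
      have hall : ∀ c ∈ cols, c ≠ [] := by
        intro c hc
        have := List.all_eq_true.mp hC.1 c hc
        simpa [List.isEmpty_iff] using this
      have ht : mlen (cols.map List.tail) = k := by rw [mlen_tail cols hne, h]; omega
      rw [ih _ ht, List.range_succ_eq_map, List.map_cons, List.map_map]
      congr 1
      · exact List.map_congr_left (fun c _ => by cases c <;> simp)
      · apply List.map_congr_left
        intro i _
        rw [List.map_map]
        exact (List.map_congr_left (fun c _ => by cases c <;> simp)).symm
    · exfalso
      rw [Decidable.not_and_iff_not_or_not] at hC
      rcases hC with hC | hC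
      · have : ∃ c ∈ cols, c.isEmpty := by
          by_contra hno
          push Not at hno
          exact hC (List.all_eq_true.mpr (fun c hc => by simpa using hno c hc))
        obtain ⟨c, hc, hce⟩ := this
        have h1 := mlen_le cols c hc
        rw [h] at h1
        simp [List.isEmpty_iff, List.length_eq_zero_iff] at hce
        simp [hce] at h1
      · rw [not_not] at hC
        subst hC
        simp [mlen] at h

-- concatenation of lines, each followed by a newline
def glue : List String → String
  | [] => ""
  | p :: rest => p ++ "\n" ++ glue rest

theorem glue_append (a b : List String) : glue (a ++ b) = glue a ++ glue b := by
  induction a with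
  | nil => simp [glue, String.empty_append]
  | cons p rest ih => simp [glue, ih, String.append_assoc]

-- the lines one table contributes, shared shape of both ports
def tableLines (table : List (String × List Int)) : List String :=
  let d := PySem.Dict.ofList table
  let keys := d.keys
  PySem.Str.join "," keys ::
    ((List.range (mlen (keys.map (fun k => d.getD k [])))).map
      (fun i => PySem.Str.join "," (keys.map (fun k => PySem.Int.toStr ((d.getD k []).getD i 0))))
    ++ [sep50])

theorem rows_foldl (g : List Int → String) (rows : List (List Int)) (out : String) :
    rows.foldl (fun out row => out ++ g row ++ "\n") out = out ++ glue (rows.map g) := by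
  induction rows generalizing out with
  | nil => simp [glue, String.append_empty]
  | cons r rest ih => rw [List.foldl_cons, ih]; simp [glue, String.append_assoc]

theorem stepA_eq (out : String) (table : List (String × List Int)) :
    (let d := PySem.Dict.ofList table
     let keys := d.keys.foldl (fun ks k => ks ++ [k]) ([] : List String)
     let out2 := out ++ PySem.Str.join "," keys ++ "\n"
     let values := keys.foldl (fun vs k => vs ++ [d.getD k []]) ([] : List (List Int))
     let rows := zipStar values
     let out3 := rows.foldl (fun o row =>
       o ++ PySem.Str.join "," (row.foldl (fun rs e => rs ++ [PySem.Int.toStr e]) ([] : List String)) ++ "\n") out2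
     out3 ++ sep50 ++ "\n")
    = out ++ glue (tableLines table) := by
  simp only [PySem.List.foldl_append_singleton, PySem.List.foldl_append_singleton_eq_map,
    List.nil_append]
  rw [zipStar_eq (mlen ((PySem.Dict.ofList table).keys.map
        (fun k => (PySem.Dict.ofList table).getD k []))) _ rfl]
  rw [rows_foldl]
  simp only [tableLines, glue, glue_append, List.map_map, String.append_assoc]
  rw [show (List.map
                ((fun row => PySem.Str.join "," (List.map PySem.Int.toStr row)) ∘ fun i =>
                  List.map ((fun c => c.getD i 0) ∘ fun k => (PySem.Dict.ofList table).getD k [])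
                    (PySem.Dict.ofList table).keys)
                (List.range
                  (mlen (List.map (fun k => (PySem.Dict.ofList table).getD k []) (PySem.Dict.ofList table).keys))))
      = (List.map
                (fun i =>
                  PySem.Str.join ","
                    (List.map (fun k => PySem.Int.toStr (((PySem.Dict.ofList table).getD k []).getD i 0))
                      (PySem.Dict.ofList table).keys))
                (List.range
                  (mlen (List.map (fun k => (PySem.Dict.ofList table).getD k []) (PySem.Dict.ofList table).keys))))
      from List.map_congr_left (fun i _ => by
        simp only [Function.comp, List.map_map]
        exact congrArg _ (List.map_congr_left (fun k _ => rfl)))]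
  rw [String.append_empty]

theorem A_fold (db : List (List (String × List Int))) (acc : String) :
    db.foldl (fun output table =>
      let d := PySem.Dict.ofList table
      let keys := d.keys.foldl (fun ks k => ks ++ [k]) ([] : List String)
      let output := output ++ PySem.Str.join "," keys ++ "\n"
      let values := keys.foldl (fun vs k => vs ++ [d.getD k []]) ([] : List (List Int))
      let rows := zipStar values
      let output := rows.foldl (fun out row =>
        out ++ PySem.Str.join "," (row.foldl (fun rs e => rs ++ [PySem.Int.toStr e]) ([] : List String)) ++ "\n") output
      output ++ sep50 ++ "\n") acc
    = acc ++ glue (db.flatMap tableLines) := by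
  induction db generalizing acc with
  | nil => simp [glue, String.append_empty]
  | cons t rest ih =>
    rw [List.foldl_cons, ih, List.flatMap_cons, glue_append]
    rw [show (let d := PySem.Dict.ofList t
      let keys := d.keys.foldl (fun ks k => ks ++ [k]) ([] : List String)
      let output := acc ++ PySem.Str.join "," keys ++ "\n"
      let values := keys.foldl (fun vs k => vs ++ [d.getD k []]) ([] : List (List Int))
      let rows := zipStar values
      let output := rows.foldl (fun out row =>
        out ++ PySem.Str.join "," (row.foldl (fun rs e => rs ++ [PySem.Int.toStr e]) ([] : List String)) ++ "\n") output
      output ++ sep50 ++ "\n") = acc ++ glue (tableLines t) from stepA_eq acc t]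
    rw [String.append_assoc]

-- B-side lemmas

def bstep (rows : Option (List String)) (c : List Int) : Option (List String) :=
  let strs := c.map PySem.Int.toStr
  match rows with
  | none => some strs
  | some rs => some (List.zipWith (fun r s => r ++ "," ++ s) rs strs)

def rowJoin (cols : List (List Int)) (i : Nat) : String :=
  PySem.Str.join "," (cols.map (fun c => PySem.Int.toStr (c.getD i 0)))

def rowsOf (cols : List (List Int)) : List String :=
  (List.range (mlen cols)).map (rowJoin cols)

theorem str_join_singleton (sep p : String) : PySem.Str.join sep [p] = p := by
  unfold PySem.Str.join
  rw [List.map_cons, List.map_nil, PySem.Chars.join_singleton, String.ofList_toList]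

theorem str_join_cons_cons (sep p q : String) (rest : List String) :
    PySem.Str.join sep (p::q::rest) = p ++ sep ++ PySem.Str.join sep (q::rest) := by
  unfold PySem.Str.join
  rw [List.map_cons, List.map_cons, PySem.Chars.join_cons_cons, String.ofList_append,
    String.ofList_append, String.ofList_toList, String.ofList_toList]

theorem str_join_snoc (sep y : String) (xs : List String) (h : xs ≠ []) :
    PySem.Str.join sep (xs ++ [y]) = PySem.Str.join sep xs ++ sep ++ y := by
  induction xs with
  | nil => exact absurd rfl h
  | cons p rest ih =>
    cases rest with
    | nil => rw [List.cons_append, List.nil_append, str_join_cons_cons, str_join_singleton, str_join_singleton]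
    | cons q rest2 =>
      have ih2 : PySem.Str.join sep (q :: (rest2 ++ [y]))
          = PySem.Str.join sep (q :: rest2) ++ sep ++ y := by
        rw [← List.cons_append]; exact ih (by simp)
      rw [List.cons_append, List.cons_append, str_join_cons_cons, ih2]
      simp [str_join_cons_cons, String.append_assoc]

theorem map_toStr_range (c : List Int) :
    c.map PySem.Int.toStr = (List.range c.length).map (fun i => PySem.Int.toStr (c.getD i 0)) := by
  apply List.ext_getElem
  · simp
  · intro i h1 h2
    simp [List.getD_eq_getElem?_getD, List.getElem?_eq_getElem (by simpa using h1)]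

theorem zipWith_range {α : Type} (f : String → String → α) (g h : Nat → String) (m n : Nat) :
    List.zipWith f ((List.range m).map g) ((List.range n).map h)
      = (List.range (min m n)).map (fun i => f (g i) (h i)) := by
  apply List.ext_getElem
  · simp
  · intro i h1 h2
    simp

theorem mlen_snoc (P : List (List Int)) (c : List Int) (hP : P ≠ []) :
    mlen (P ++ [c]) = min (mlen P) c.length := by
  unfold mlen
  rcases hm : (P.map List.length).min? with _ | m
  · simp [List.min?_eq_none_iff] at hm; exact absurd hm hP
  · have hmem := (List.min?_eq_some_iff.mp hm).1
    have hlb := (List.min?_eq_some_iff.mp hm).2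
    have h2 : ((P ++ [c]).map List.length).min? = some (min m c.length) := by
      rw [List.min?_eq_some_iff]
      constructor
      · rw [List.map_append, List.mem_append]
        rcases le_total m c.length with hle | hle
        · left; rw [min_eq_left hle]; exact hmem
        · right; rw [min_eq_right hle]; simp
      · intro b hb
        rw [List.map_append, List.mem_append] at hb
        rcases hb with hb | hb
        · exact le_trans (min_le_left _ _) (hlb b hb)
        · simp at hb; omega
    rw [h2]
    simp

theorem rowJoin_snoc (P : List (List Int)) (c : List Int) (hP : P ≠ []) (i : Nat) :
    rowJoin (P ++ [c]) i = rowJoin P i ++ "," ++ PySem.Int.toStr (c.getD i 0) := by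
  unfold rowJoin
  rw [List.map_append, List.map_singleton, str_join_snoc _ _ _ (by simpa using hP)]

theorem rowsOf_snoc (P : List (List Int)) (c : List Int) (hP : P ≠ []) :
    List.zipWith (fun r s => r ++ "," ++ s) (rowsOf P) (c.map PySem.Int.toStr)
      = rowsOf (P ++ [c]) := by
  unfold rowsOf
  rw [map_toStr_range, zipWith_range, mlen_snoc P c hP]
  exact List.map_congr_left (fun i _ => (rowJoin_snoc P c hP i).symm)

theorem bfold_aux (rest : List (List Int)) : ∀ P, P ≠ [] →
    rest.foldl bstep (some (rowsOf P)) = some (rowsOf (P ++ rest)) := by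
  induction rest with
  | nil => intro P _; simp
  | cons c rest2 ih =>
    intro P hP
    rw [List.foldl_cons]
    have : bstep (some (rowsOf P)) c = some (rowsOf (P ++ [c])) := by
      unfold bstep
      simp only []
      rw [rowsOf_snoc P c hP]
    rw [this, ih (P ++ [c]) (by simp), List.append_assoc]
    rfl

theorem bfold (cols : List (List Int)) :
    (cols.foldl bstep none).getD [] = rowsOf cols := by
  cases cols with
  | nil => simp [rowsOf, mlen]
  | cons c rest =>
    rw [List.foldl_cons]
    have hm1 : mlen [c] = c.length := by simp [mlen, List.min?_cons]
    have h0 : bstep none c = some (rowsOf [c]) := by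
      show some (c.map PySem.Int.toStr) = some (rowsOf [c])
      rw [rowsOf, hm1, map_toStr_range]
      exact congrArg some (List.map_congr_left (fun i _ => by
        unfold rowJoin
        rw [List.map_singleton, str_join_singleton]))
    rw [h0, bfold_aux rest [c] (by simp)]
    rfl

theorem join_newline (parts : List String) (hne : parts ≠ []) :
    PySem.Str.join "\n" parts ++ "\n" = glue parts := by
  induction parts with
  | nil => exact absurd rfl hne
  | cons p rest ih =>
    cases rest with
    | nil =>
      show PySem.Str.join "\n" [p] ++ "\n" = p ++ "\n" ++ ""
      rw [String.append_empty, str_join_singleton]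
    | cons q rest2 =>
      rw [str_join_cons_cons, String.append_assoc, ih (by simp)]
      rfl

theorem lines_eq (table : List (String × List Int)) :
    (PySem.Str.join "," (PySem.Dict.ofList table).keys ::
        (rowsOf ((PySem.Dict.ofList table).keys.map (fun k => (PySem.Dict.ofList table).getD k []))
          ++ [sep50]))
      = tableLines table := by
  unfold tableLines rowsOf
  simp only []
  congr 2
  apply List.map_congr_left
  intro i _
  unfold rowJoin
  rw [List.map_map]
  rfl

theorem chunk_eq (table : List (String × List Int)) :
    (let d := PySem.Dict.ofList table
     let rows := d.keys.foldl (fun rows k =>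
       let strs := (d.getD k []).map PySem.Int.toStr
       match rows with
       | none => some strs
       | some rs => some (List.zipWith (fun r s => r ++ "," ++ s) rs strs)) (none : Option (List String))
     PySem.Str.join "\n" (PySem.Str.join "," d.keys :: (rows.getD [] ++ [sep50])) ++ "\n")
    = glue (tableLines table) := by
  simp only []
  have hstep : (PySem.Dict.ofList table).keys.foldl (fun rows k =>
      let strs := ((PySem.Dict.ofList table).getD k []).map PySem.Int.toStr
      match rows with
      | none => some strs
      | some rs => some (List.zipWith (fun r s => r ++ "," ++ s) rs strs)) (none : Option (List String))
      = ((PySem.Dict.ofList table).keys.map (fun k => (PySem.Dict.ofList table).getD k [])).foldl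
          bstep none := by
    rw [List.foldl_map]
    rfl
  rw [hstep, bfold, join_newline _ (by simp)]
  exact congrArg glue (lines_eq table)

theorem B_fold (db : List (List (String × List Int))) (acc : List String) :
    db.foldl (fun chunks table =>
      let d := PySem.Dict.ofList table
      let rows := d.keys.foldl (fun rows k =>
        let strs := (d.getD k []).map PySem.Int.toStr
        match rows with
        | none => some strs
        | some rs => some (List.zipWith (fun r s => r ++ "," ++ s) rs strs)) (none : Option (List String))
      chunks ++ [PySem.Str.join "\n" (PySem.Str.join "," d.keys :: (rows.getD [] ++ [sep50])) ++ "\n"]) acc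
    = acc ++ db.map (fun t => glue (tableLines t)) := by
  induction db generalizing acc with
  | nil => simp
  | cons t rest ih =>
    rw [List.foldl_cons, ih, List.map_cons]
    rw [show (let d := PySem.Dict.ofList t
      let rows := d.keys.foldl (fun rows k =>
        let strs := (d.getD k []).map PySem.Int.toStr
        match rows with
        | none => some strs
        | some rs => some (List.zipWith (fun r s => r ++ "," ++ s) rs strs)) (none : Option (List String))
      acc ++ [PySem.Str.join "\n" (PySem.Str.join "," d.keys :: (rows.getD [] ++ [sep50])) ++ "\n"])
      = acc ++ [glue (tableLines t)] from by rw [← chunk_eq t]]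
    simp

theorem string_foldl_append (l : List String) (a : String) :
    l.foldl (fun r s => r ++ s) a = a ++ l.foldl (fun r s => r ++ s) "" := by
  induction l generalizing a with
  | nil => simp [String.append_empty]
  | cons h t ih =>
    rw [List.foldl_cons, List.foldl_cons, ih (a ++ h), ih ("" ++ h),
      String.empty_append, String.append_assoc]

theorem string_join_cons (x : String) (l : List String) :
    String.join (x :: l) = x ++ String.join l := by
  show (x :: l).foldl (fun r s => r ++ s) "" = x ++ l.foldl (fun r s => r ++ s) ""
  rw [List.foldl_cons, string_foldl_append l ("" ++ x), String.empty_append]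

theorem join_map_glue (db : List (List (String × List Int))) :
    String.join (db.map (fun t => glue (tableLines t))) = glue (db.flatMap tableLines) := by
  induction db with
  | nil => rfl
  | cons t rest ih =>
    rw [List.map_cons, List.flatMap_cons, glue_append, string_join_cons, ih]

-- ===== VERDICT (by name: the statement is the Claim_ definition above) =====
theorem readable_db_spec : Claim_equal_readable_db := by
  intro db _
  unfold Spec_readable_db readable_db readable_db_alt
  rw [A_fold db "", B_fold db [], String.empty_append, List.nil_append, join_map_glue]
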